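-- pv_equiv track=rewrite | github.com/mcrayman/Project-Python- | 2150/recursion.py | all_even
-- ===== SOURCE A (Python) =====
-- def all_even(stuff):
-- 	if len(stuff) == 0:
-- 		return True
-- 	else:
-- 		if stuff[0] % 2 == 0 and all_even(stuff[1:]):
-- 			return True
-- 		else:
-- 			return False
-- ===== SOURCE B (Python) =====
-- def all_even(stuff):
-- 	for x in stuff:
-- 		if x % 2 != 0:
-- 			return False
-- 	return True
-- ===== Notes on version B (the rewrite author's own statement) =====
-- stated objective: simpler
-- what changed: Recursion over tail slices is replaced by a flat iterative loop with an early return on the first odd element.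
import Mathlib
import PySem

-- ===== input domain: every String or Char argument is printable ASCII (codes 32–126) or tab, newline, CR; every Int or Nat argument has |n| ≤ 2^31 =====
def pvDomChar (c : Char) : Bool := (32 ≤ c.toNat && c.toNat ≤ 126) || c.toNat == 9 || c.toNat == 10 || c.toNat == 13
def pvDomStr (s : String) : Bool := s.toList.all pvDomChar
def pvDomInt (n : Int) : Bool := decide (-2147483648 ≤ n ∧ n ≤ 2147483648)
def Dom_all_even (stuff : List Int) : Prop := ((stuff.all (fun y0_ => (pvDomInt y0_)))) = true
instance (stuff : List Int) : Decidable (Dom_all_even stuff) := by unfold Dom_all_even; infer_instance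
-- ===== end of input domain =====

-- B replaces A's recursion over tail slices with a flat loop returning False at the first odd element (simpler).

-- ===== PORT A =====
-- recursion on the list: stuff[0] is the head, stuff[1:] is the tail
def all_even (stuff : List Int) : Bool :=
  if stuff.length = 0 then true
  else
    match stuff with
    | [] => true
    | x :: rest =>
      if PySem.Int.mod x 2 == 0 && all_even rest then true else false

-- ===== PORT B =====
-- the for-loop with early return, as structural recursion over the remaining elements
def allEvenLoop : List Int → Bool
  | [] => true
  | x :: rest => if PySem.Int.mod x 2 != 0 then false else allEvenLoop rest

def all_even_alt (stuff : List Int) : Bool := allEvenLoop stuff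

-- ===== PRECONDITION & SPEC =====
def Spec_all_even (stuff : List Int) (out : Bool) : Prop := out = all_even_alt stuff
instance (stuff : List Int) (out : Bool) : Decidable (Spec_all_even stuff out) := by unfold Spec_all_even; infer_instance

-- ===== CLAIM (what is proved, stated in full; the proofs are below) =====
def Claim_equal_all_even : Prop := ∀ (stuff : List Int), Dom_all_even stuff → Spec_all_even stuff (all_even stuff)

-- ===== LEMMAS AND PROOFS =====
theorem all_even_eq_alt (stuff : List Int) : all_even stuff = all_even_alt stuff := by
  induction stuff with
  | nil => simp [all_even, all_even_alt, allEvenLoop]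
  | cons x rest ih =>
    simp only [all_even, all_even_alt, allEvenLoop] at *
    by_cases h : PySem.Int.mod x 2 == 0 <;> simp_all

-- ===== VERDICT (by name: the statement is the Claim_ definition above) =====
theorem all_even_spec : Claim_equal_all_even := by
  intro stuff _
  exact all_even_eq_alt stuff
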